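-- pv_equiv track=rewrite | github.com/KathTheDragon/Conlanger | src/syllables.py | generateFinals
-- ===== SOURCE A (Python) =====
-- def generateFinals(codas, margins):
--     rules = []
--     for mrank, margin in enumerate([margin for margin in margins if margin[-1] == '#']):
--         if margin == ['_', '#']:
--             margin = ['#']
--         for crank, coda in enumerate(codas):
--             if coda[-1] == '#':
--                 if margin == ['#']:
--                     coda = coda[:-1]
--                 else:
--                     continue
--             pattern = coda + margin
--             breaks = [0 if coda == ['_'] else len(coda)]
--             rank = crank + mrank
--             rules.append((pattern, breaks, rank))
--     return (r[:2] for r in sorted(rules, key=lambda r: r[2]))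
-- ===== SOURCE B (Python) =====
-- def generateFinals(codas, margins):
--     # Diagonal (anti-diagonal) enumeration: rank = crank + mrank, so instead of
--     # collecting all rules and sorting by rank, walk ranks k = 0, 1, ... directly
--     # and for each k visit (mrank, crank = k - mrank) in increasing mrank order,
--     # which reproduces the stable sort order with no sort at all.
--     finals = [['#'] if m == ['_', '#'] else m for m in margins if m[-1] == '#']
--
--     def rule(coda, margin):
--         if coda[-1] == '#':
--             if margin != ['#']:
--                 return None
--             coda = coda[:-1]
--         return (coda + margin, [0 if coda == ['_'] else len(coda)])
--
--     def diagonal(k):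
--         for mrank, margin in enumerate(finals):
--             crank = k - mrank
--             if 0 <= crank < len(codas):
--                 r = rule(codas[crank], margin)
--                 if r is not None:
--                     yield r
--
--     return (r for k in range(len(codas) + len(finals) - 1) for r in diagonal(k))
-- ===== Notes on version B (the rewrite author's own statement) =====
-- stated objective: alternative
-- what changed: B never builds or sorts a rules list: since rank = crank + mrank, it walks ranks k = 0,1,... directly and for each k visits (mrank, crank = k - mrank) via random access into codas (an anti-diagonal traversal with a rule() helper returning None for skipped codas), which reproduces the stable sort order with no sort and no rank field.
import Mathlib
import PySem

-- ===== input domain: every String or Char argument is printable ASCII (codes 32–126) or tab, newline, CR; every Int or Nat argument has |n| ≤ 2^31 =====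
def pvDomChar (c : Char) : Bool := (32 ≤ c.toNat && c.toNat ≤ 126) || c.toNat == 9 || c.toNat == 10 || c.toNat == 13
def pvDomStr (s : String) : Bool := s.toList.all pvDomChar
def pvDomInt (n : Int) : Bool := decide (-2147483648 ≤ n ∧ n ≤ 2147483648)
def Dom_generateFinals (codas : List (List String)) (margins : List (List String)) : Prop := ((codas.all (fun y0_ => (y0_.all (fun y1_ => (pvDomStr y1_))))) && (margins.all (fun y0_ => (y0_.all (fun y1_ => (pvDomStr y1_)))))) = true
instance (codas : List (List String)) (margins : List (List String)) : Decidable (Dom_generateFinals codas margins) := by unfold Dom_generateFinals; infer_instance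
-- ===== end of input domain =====

-- B replaces A's collect-then-sort-by-rank by a direct anti-diagonal traversal: since
-- rank = crank + mrank, walking ranks k = 0,1,… and visiting (mrank, crank = k - mrank)
-- in increasing mrank order reproduces the stable sorted order with no sort (objective:
-- alternative algorithm).

-- ===== PORT A =====
-- margin[-1] / coda[-1] are PySem.List.pyGet? _ (-1); outside Pre_ Python raises IndexError there
-- (pyGet? = none), so the `.getD ""` default is never observed on admitted inputs.
def generateFinals (codas : List (List String)) (margins : List (List String)) : List (List String × List Int) :=
  let rules : List (List String × List Int × Int) :=
    (PySem.List.enumerate (margins.filter (fun margin => (PySem.List.pyGet? margin (-1)).getD "" == "#"))).foldl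
      (fun rules mm =>
        let mrank := mm.1
        let margin := if mm.2 == ["_", "#"] then ["#"] else mm.2
        (PySem.List.enumerate codas).foldl
          (fun rules cc =>
            let crank := cc.1
            let coda := cc.2
            if (PySem.List.pyGet? coda (-1)).getD "" == "#" then
              if margin == ["#"] then
                let coda := PySem.List.slice coda none (some (-1))  -- coda[:-1]
                rules ++ [(coda ++ margin, [if coda == ["_"] then (0 : Int) else (coda.length : Int)], crank + mrank)]
              else rules
            else
              rules ++ [(coda ++ margin, [if coda == ["_"] then (0 : Int) else (coda.length : Int)], crank + mrank)]) rules) []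
  (PySem.List.sorted rules (fun r => r.2.2)).map (fun r => (r.1, r.2.1))

-- ===== PORT B =====
-- the common `return (coda + margin, [...])` tail of Source B's `rule` helper
def gfMk (coda : List String) (margin : List String) : List String × List Int :=
  (coda ++ margin, [if coda == ["_"] then (0 : Int) else (coda.length : Int)])

-- Source B's `rule(coda, margin)`: None = Python's None
def gfRule (coda : List String) (margin : List String) : Option (List String × List Int) :=
  if (PySem.List.pyGet? coda (-1)).getD "" == "#" then
    if margin == ["#"] then some (gfMk (PySem.List.slice coda none (some (-1))) margin) else none
  else some (gfMk coda margin)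

-- Source B's `diagonal(k)` generator, as the list of the values it yields;
-- codas[crank] with 0 ≤ crank < len(codas) guarded, so pyGet? is some there
def gfDiagonal (codas : List (List String)) (finals : List (List String)) (k : Int) : List (List String × List Int) :=
  (PySem.List.enumerate finals).flatMap (fun mm =>
    let crank := k - mm.1
    if 0 ≤ crank ∧ crank < (codas.length : Int) then
      match gfRule ((PySem.List.pyGet? codas crank).getD []) mm.2 with
      | some r => [r]
      | none => []
    else [])

def generateFinals_alt (codas : List (List String)) (margins : List (List String)) : List (List String × List Int) :=
  let finals := (margins.filter (fun m => (PySem.List.pyGet? m (-1)).getD "" == "#")).map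
    (fun m => if m == ["_", "#"] then ["#"] else m)
  (PySem.List.pyRange 0 ((codas.length : Int) + (finals.length : Int) - 1) 1).flatMap
    (gfDiagonal codas finals)

-- ===== PRECONDITION & SPEC =====
-- Pre_ excludes exactly the inputs where A raises IndexError (B raises there too): an empty
-- margin (margin[-1] in the filtering comprehension), or an empty coda while at least one
-- margin ends in '#' (coda[-1] is then evaluated for every coda).
def Pre_generateFinals (codas : List (List String)) (margins : List (List String)) : Prop :=
  (∀ m ∈ margins, m ≠ []) ∧ ((∃ m ∈ margins, m.getLast? = some "#") → ∀ c ∈ codas, c ≠ [])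
instance (codas : List (List String)) (margins : List (List String)) : Decidable (Pre_generateFinals codas margins) := by
  unfold Pre_generateFinals; infer_instance
def pvWitness_generateFinals : List (List String) × List (List String) :=
  ([["a"], ["b", "#"]], [["_", "#"], ["c", "#"], ["x"]])

def Spec_generateFinals (codas : List (List String)) (margins : List (List String)) (out : List (List String × List Int)) : Prop := out = generateFinals_alt codas margins
instance (codas : List (List String)) (margins : List (List String)) (out : List (List String × List Int)) : Decidable (Spec_generateFinals codas margins out) := by unfold Spec_generateFinals; infer_instance

-- ===== CLAIM (what is proved, stated in full; the proofs are below) =====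
def Claim_equal_generateFinals : Prop := ∀ (codas : List (List String)) (margins : List (List String)), Dom_generateFinals codas margins → Pre_generateFinals codas margins → Spec_generateFinals codas margins (generateFinals codas margins)

-- ===== LEMMAS AND PROOFS =====

-- the margin substitution '_#' → '#'
def pvSub (m : List String) : List String := if m == ["_", "#"] then ["#"] else m

-- one rule triple (pattern, breaks, rank) of A, expressed through Source B's rule helper
def pvItm (codas : List (List String)) (mm : Int × List String) : List (List String × List Int × Int) :=
  (PySem.List.enumerate codas).flatMap (fun cc =>
    match gfRule cc.2 mm.2 with
    | some pb => [(pb.1, pb.2, cc.1 + mm.1)]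
    | none => [])

-- A's full rules list, indexed over the ALREADY substituted margins
def pvItems (codas : List (List String)) (finals : List (List String)) : List (List String × List Int × Int) :=
  (PySem.List.enumerate finals).flatMap (pvItm codas)

lemma enumerate_map {α β : Type} (g : α → β) (l : List α) :
    ∀ s : Int, PySem.List.enumerate (l.map g) s
      = (PySem.List.enumerate l s).map (fun p => (p.1, g p.2)) := by
  induction l with
  | nil => intro s; simp [PySem.List.enumerate_nil]
  | cons x t ih => intro s; simp [PySem.List.enumerate_cons, ih]

lemma rules_eq_pvItems (codas margins : List (List String)) :
    (PySem.List.enumerate (margins.filter (fun margin => (PySem.List.pyGet? margin (-1)).getD "" == "#"))).foldl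
      (fun rules mm =>
        let mrank := mm.1
        let margin := if mm.2 == ["_", "#"] then ["#"] else mm.2
        (PySem.List.enumerate codas).foldl
          (fun rules cc =>
            let crank := cc.1
            let coda := cc.2
            if (PySem.List.pyGet? coda (-1)).getD "" == "#" then
              if margin == ["#"] then
                let coda := PySem.List.slice coda none (some (-1))
                rules ++ [(coda ++ margin, [if coda == ["_"] then (0 : Int) else (coda.length : Int)], crank + mrank)]
              else rules
            else
              rules ++ [(coda ++ margin, [if coda == ["_"] then (0 : Int) else (coda.length : Int)], crank + mrank)]) rules) []
    = pvItems codas ((margins.filter (fun m => (PySem.List.pyGet? m (-1)).getD "" == "#")).map pvSub) := by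
  set fl := margins.filter (fun m => (PySem.List.pyGet? m (-1)).getD "" == "#") with hfl
  have hb : (fun (rules : List (List String × List Int × Int)) (mm : Int × List String) =>
        let mrank := mm.1
        let margin := if mm.2 == ["_", "#"] then ["#"] else mm.2
        (PySem.List.enumerate codas).foldl
          (fun rules cc =>
            let crank := cc.1
            let coda := cc.2
            if (PySem.List.pyGet? coda (-1)).getD "" == "#" then
              if margin == ["#"] then
                let coda := PySem.List.slice coda none (some (-1))
                rules ++ [(coda ++ margin, [if coda == ["_"] then (0 : Int) else (coda.length : Int)], crank + mrank)]
              else rules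
            else
              rules ++ [(coda ++ margin, [if coda == ["_"] then (0 : Int) else (coda.length : Int)], crank + mrank)]) rules)
      = (fun rules mm => rules ++ pvItm codas (mm.1, pvSub mm.2)) := by
    funext rules mm
    show (PySem.List.enumerate codas).foldl _ rules = _
    have hinner : (fun (rules : List (List String × List Int × Int)) (cc : Int × List String) =>
        let crank := cc.1
        let coda := cc.2
        if (PySem.List.pyGet? coda (-1)).getD "" == "#" then
          if (if mm.2 == ["_", "#"] then ["#"] else mm.2) == ["#"] then
            let coda := PySem.List.slice coda none (some (-1))
            rules ++ [(coda ++ (if mm.2 == ["_", "#"] then ["#"] else mm.2), [if coda == ["_"] then (0 : Int) else (coda.length : Int)], crank + mm.1)]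
          else rules
        else
          rules ++ [(coda ++ (if mm.2 == ["_", "#"] then ["#"] else mm.2), [if cc.2 == ["_"] then (0 : Int) else (cc.2.length : Int)], crank + mm.1)])
      = (fun rules cc => rules ++
          (match gfRule cc.2 (pvSub mm.2) with
           | some pb => [(pb.1, pb.2, cc.1 + mm.1)]
           | none => [])) := by
      funext rules cc
      simp only [gfRule, gfMk, pvSub]
      cases h1 : ((PySem.List.pyGet? cc.2 (-1)).getD "" == "#") <;>
        cases h2 : ((if mm.2 == ["_", "#"] then ["#"] else mm.2) == ["#"]) <;>
          simp
    rw [hinner, PySem.List.foldl_append_eq_flatMap]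
    rfl
  rw [hb, PySem.List.foldl_append_eq_flatMap, List.nil_append]
  unfold pvItems
  rw [enumerate_map, List.flatMap_map]

-- ranks are strictly below |codas| + |finals| - 1 (both lists nonempty whenever a rule exists)
lemma pvItems_rank_bound (codas finals : List (List String)) :
    ∀ r ∈ pvItems codas finals, 0 ≤ r.2.2 ∧ r.2.2 < ((codas.length + finals.length - 1 : Nat) : Int) := by
  intro r hr
  rcases List.mem_flatMap.mp hr with ⟨mm, hmm, hr'⟩
  rcases (PySem.List.mem_enumerate_iff _ _ _).mp hmm with ⟨i, hi, rfl⟩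
  unfold pvItm at hr'
  rcases List.mem_flatMap.mp hr' with ⟨cc, hcc, hr''⟩
  rcases (PySem.List.mem_enumerate_iff _ _ _).mp hcc with ⟨j, hj, rfl⟩
  have h2 : r.2.2 = (j : Int) + (i : Int) := by
    cases h : gfRule codas[j] finals[i]
    · simp [h] at hr''
    · simp [h] at hr''; simp [hr'']
  constructor
  · simp [h2]; omega
  · simp [h2]; omega

lemma insertBy_append_not_before {α : Type} (before : α → α → Bool) (x : α) :
    ∀ (l1 l2 : List α), (∀ y ∈ l1, before x y = false) →
      PySem.List.insertBy before x (l1 ++ l2) = l1 ++ PySem.List.insertBy before x l2 := by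
  intro l1
  induction l1 with
  | nil => simp
  | cons y t ih =>
    intro l2 h
    have hy : before x y = false := h y (by simp)
    simp [PySem.List.insertBy, hy, ih l2 (fun z hz => h z (by simp [hz]))]

lemma insertBy_all_before {α : Type} (before : α → α → Bool) (x : α) (l : List α)
    (h : ∀ y ∈ l, before x y = true) : PySem.List.insertBy before x l = x :: l := by
  cases l with
  | nil => rfl
  | cons y t => simp [PySem.List.insertBy, h y (by simp)]

lemma insertBy_grouped {α : Type} (key : α → Int) (x : α) :
    ∀ (ks : List Nat) (B : Nat → List α), ks.Pairwise (· < ·) →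
      (∀ k ∈ ks, ∀ y ∈ B k, key y = (k : Int)) →
      ∀ k0 ∈ ks, key x = (k0 : Int) →
      PySem.List.insertBy (fun a b => decide (key a < key b)) x (ks.flatMap B)
        = ks.flatMap (fun k => B k ++ if k = k0 then [x] else []) := by
  intro ks
  induction ks with
  | nil => intro B _ _ k0 hk0; simp at hk0
  | cons k t ih =>
    intro B hp hB k0 hk0 hkey
    have hpt := (List.pairwise_cons.mp hp).2
    have hlt := (List.pairwise_cons.mp hp).1
    rcases List.mem_cons.mp hk0 with rfl | hk0t
    · have h1 : ∀ y ∈ B k0, (fun a b => decide (key a < key b)) x y = false := by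
        intro y hy
        have := hB k0 (by simp) y hy
        simp [this, hkey]
      rw [List.flatMap_cons, insertBy_append_not_before _ _ _ _ h1]
      have h2 : ∀ y ∈ t.flatMap B, (fun a b => decide (key a < key b)) x y = true := by
        intro y hy
        rcases List.mem_flatMap.mp hy with ⟨k', hk', hy'⟩
        have := hB k' (by simp [hk']) y hy'
        have hk0k' : k0 < k' := hlt k' hk'
        simp [this, hkey]
        exact_mod_cast hk0k'
      rw [insertBy_all_before _ _ _ h2]
      have h3 : t.flatMap (fun k => B k ++ if k = k0 then [x] else []) = t.flatMap B := by
        apply List.flatMap_congr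
        intro k' hk'
        have := hlt k' hk'
        simp [show k' ≠ k0 from by omega]
      simp [List.flatMap_cons, h3]
    · have h1 : ∀ y ∈ B k, (fun a b => decide (key a < key b)) x y = false := by
        intro y hy
        have := hB k (by simp) y hy
        have : key y < key x := by
          rw [this, hkey]; exact_mod_cast hlt k0 hk0t
        simp; omega
      rw [List.flatMap_cons, insertBy_append_not_before _ _ _ _ h1,
        ih B hpt (fun k' hk' => hB k' (by simp [hk'])) k0 hk0t hkey]
      have hne : k ≠ k0 := by have := hlt k0 hk0t; omega
      simp [List.flatMap_cons, hne]

lemma sorted_eq_buckets {α : Type} (key : α → Int) (n : Nat) :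
    ∀ xs : List α, (∀ x ∈ xs, 0 ≤ key x ∧ key x < (n : Int)) →
      PySem.List.sorted xs key = (List.range n).flatMap (fun (k : Nat) => xs.filter (fun x => key x == (k : Int))) := by
  intro xs
  induction xs using List.reverseRecOn with
  | nil => intro _; simp [PySem.List.sorted_eq_foldl_insertBy]
  | append_singleton xs x ih =>
    intro h
    have hxs : ∀ y ∈ xs, 0 ≤ key y ∧ key y < (n : Int) := fun y hy => h y (by simp [hy])
    have hx := h x (by simp)
    rw [PySem.List.sorted_eq_foldl_insertBy, List.foldl_append, List.foldl_cons, List.foldl_nil,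
      ← PySem.List.sorted_eq_foldl_insertBy, ih hxs]
    rw [insertBy_grouped key x (List.range n) _ (List.pairwise_lt_range)
      (by intro k hk y hy; have := (List.mem_filter.mp hy).2; simpa using this)
      (key x).toNat (by simp; omega) (by omega)]
    apply List.flatMap_congr
    intro k hk
    simp only [List.filter_append, List.filter_cons, List.filter_nil]
    by_cases hkx : key x = (k : Int)
    · simp [hkx]
    · have hne : ¬ k = (key x).toNat := by omega
      simp [hkx, hne]

-- selecting the unique index t out of an enumerate-flatMap
lemma flatMap_enumerate_select {α β : Type} [Inhabited α] (g : Int × α → List β) (t : Int) :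
    ∀ (xs : List α) (s : Int),
      (PySem.List.enumerate xs s).flatMap (fun cc => if cc.1 == t then g cc else []) =
      if s ≤ t ∧ t < s + xs.length then g (t, xs[(t - s).toNat]!) else [] := by
  intro xs
  induction xs with
  | nil => intro s; simp [PySem.List.enumerate_nil]
  | cons x tl ih =>
    intro s
    rw [PySem.List.enumerate_cons, List.flatMap_cons, ih (s + 1)]
    by_cases hst : s = t
    · subst hst
      have h1 : ¬ (s + 1 ≤ s ∧ s < s + 1 + (tl.length : Int)) := by omega
      have h2 : s ≤ s ∧ s < s + ((x :: tl).length : Int) := by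
        simp only [List.length_cons]; push_cast; omega
      rw [if_neg h1, if_pos h2, List.append_nil,
        if_pos (by simp : ((s, x).1 == s) = true)]
      simp
    · rw [if_neg (by simp only [beq_iff_eq]; exact hst : ¬ ((s, x).1 == t) = true),
        List.nil_append]
      by_cases hin : s + 1 ≤ t ∧ t < s + 1 + (tl.length : Int)
      · have hin2 : s ≤ t ∧ t < s + ((x :: tl).length : Int) := by
          simp only [List.length_cons]; push_cast; omega
        rw [if_pos hin, if_pos hin2]
        have hidx : (t - s).toNat = (t - (s + 1)).toNat + 1 := by omega
        have hget : (x :: tl)[(t - s).toNat]! = tl[(t - (s + 1)).toNat]! := by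
          rw [hidx]; simp
        rw [hget]
      · have hin2 : ¬ (s ≤ t ∧ t < s + ((x :: tl).length : Int)) := by
          simp only [List.length_cons] at *; push_cast at *; omega
        rw [if_neg hin, if_neg hin2]

-- the diagonal of Source B at rank k is exactly A's bucket of rank-k rules, payload-projected
lemma diagonal_eq_bucket (codas finals : List (List String)) (k : Int) :
    gfDiagonal codas finals k =
      ((pvItems codas finals).filter (fun r => r.2.2 == k)).map (fun r => (r.1, r.2.1)) := by
  unfold gfDiagonal pvItems
  rw [List.filter_flatMap, List.map_flatMap]
  apply List.flatMap_congr
  intro mm _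
  unfold pvItm
  rw [List.filter_flatMap, List.map_flatMap]
  have hg : (fun (cc : Int × List String) =>
      ((match gfRule cc.2 mm.2 with
        | some pb => [(pb.1, pb.2, cc.1 + mm.1)]
        | none => ([] : List (List String × List Int × Int))).filter
          (fun (r : List String × List Int × Int) => r.2.2 == k)).map
          (fun (r : List String × List Int × Int) => (r.1, r.2.1)))
    = (fun cc => if cc.1 == k - mm.1 then
        (match gfRule cc.2 mm.2 with
         | some pb => [pb]
         | none => []) else []) := by
    funext cc
    cases h : gfRule cc.2 mm.2
    · simp
    · by_cases he : cc.1 + mm.1 = k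
      · have h1 : ((cc.1 + mm.1 : Int) == k) = true := by simp [he]
        have h2 : (cc.1 == k - mm.1) = true := by simp; omega
        simp [h1, h2]
      · have h1 : ((cc.1 + mm.1 : Int) == k) = false := by simp; omega
        have h2 : (cc.1 == k - mm.1) = false := by simp; omega
        simp [h1, h2]
  rw [hg, flatMap_enumerate_select]
  by_cases hin : 0 ≤ k - mm.1 ∧ k - mm.1 < (codas.length : Int)
  · have hin0 : (0 : Int) ≤ k - mm.1 ∧ k - mm.1 < 0 + (codas.length : Int) := by
      constructor
      · exact hin.1
      · omega
    have hget : (PySem.List.pyGet? codas (k - mm.1)).getD [] = codas[(k - mm.1 - 0).toNat]! := by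
      rw [PySem.List.pyGet?_of_nonneg _ hin.1, sub_zero]
      simp [List.getElem!_eq_getElem?_getD]; rfl
    rw [if_pos hin, if_pos hin0, hget]
  · have hin0 : ¬ ((0 : Int) ≤ k - mm.1 ∧ k - mm.1 < 0 + (codas.length : Int)) := by
      intro h; exact hin ⟨h.1, by omega⟩
    rw [if_neg hin, if_neg hin0]

-- ===== VERDICT (by name: the statement is the Claim_ definition above) =====
theorem generateFinals_spec : Claim_equal_generateFinals := by
  intro codas margins _ _
  unfold Spec_generateFinals
  show generateFinals codas margins = generateFinals_alt codas margins
  simp only [generateFinals, generateFinals_alt]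
  rw [rules_eq_pvItems]
  set finals := (margins.filter (fun m => (PySem.List.pyGet? m (-1)).getD "" == "#")).map pvSub with hfinals
  have hfeq : ((margins.filter (fun m => (PySem.List.pyGet? m (-1)).getD "" == "#")).map
      (fun m => if m == ["_", "#"] then ["#"] else m)) = finals := by
    simp [hfinals, pvSub]
  rw [hfeq]
  set N : Nat := codas.length + finals.length - 1 with hN
  rw [sorted_eq_buckets (fun (r : List String × List Int × Int) => r.2.2) N
        (pvItems codas finals) (pvItems_rank_bound codas finals)]
  have hrange : PySem.List.pyRange 0 ((codas.length : Int) + (finals.length : Int) - 1) 1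
      = (List.range N).map (fun (k : Nat) => (k : Int)) := by
    rw [PySem.List.pyRange_one]
    have hnat : (((codas.length : Int) + (finals.length : Int) - 1) - 0).toNat = N := by omega
    rw [hnat]
    simp
  rw [hrange, List.flatMap_map, List.map_flatMap]
  apply List.flatMap_congr
  intro k _
  rw [diagonal_eq_bucket]
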